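-- pv_equiv track=rewrite | github.com/uunnxx/how-to | python/group_by.py | group_by_and_reverse
-- ===== SOURCE A (Python) =====
-- def group_by_and_reverse(lst, by):
--     grouped = []
--     len_of = len(lst)
--     idx = 0
--     temp = []
--     while True:
--         if (len_of - idx) >= by:
--             for _ in range(by):
--                 temp.append(lst[idx])
--                 idx += 1
--             grouped.extend(reversed(temp))
--             temp = []
--         else:
--             for i in lst[idx:]:
--                 temp.append(i)
--             grouped.extend(reversed(temp))
--             break
--
--     return grouped
-- ===== SOURCE B (Python) =====
-- def group_by_and_reverse(lst, by):
--     out = []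
--     for i in range(0, len(lst), by):
--         out.extend(lst[i:i+by][::-1])
--     return out
-- ===== Notes on version B (the rewrite author's own statement) =====
-- stated objective: idiomatic
-- what changed: Replaces A's while-True loop with a manual index and temp buffer by a single for over chunk offsets (range(0, len, by)) that extends the output with each reversed slice.
import Mathlib
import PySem

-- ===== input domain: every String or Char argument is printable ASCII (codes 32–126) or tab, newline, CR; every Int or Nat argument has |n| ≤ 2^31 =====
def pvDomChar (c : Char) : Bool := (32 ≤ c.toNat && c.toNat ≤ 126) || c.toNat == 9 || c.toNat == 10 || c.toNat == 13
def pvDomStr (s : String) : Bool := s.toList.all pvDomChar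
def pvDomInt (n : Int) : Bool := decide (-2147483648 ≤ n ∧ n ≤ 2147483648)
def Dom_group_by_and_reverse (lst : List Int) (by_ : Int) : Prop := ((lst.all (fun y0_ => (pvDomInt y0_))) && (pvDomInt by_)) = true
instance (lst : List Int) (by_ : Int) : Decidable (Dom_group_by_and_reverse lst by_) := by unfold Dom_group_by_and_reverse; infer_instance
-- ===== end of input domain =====

-- B replaces A's while-True loop with manual index/temp buffer by one pass over chunk
-- offsets that extends the output with each reversed slice (objective: idiomatic).

-- ===== PORT A =====
-- the 'for _ in range(by): temp.append(lst[idx]); idx += 1' inner loop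
-- (lst[idx] is always in range when the loop guard holds and by ≥ 1; pyGetD's default is unreachable inside Pre_)
def groupAStep (lst : List Int) (by_ : Int) (idx : Nat) : List Int × Nat :=
  (PySem.List.pyRange 0 by_ 1).foldl
    (fun (s : List Int × Nat) _ => (s.1 ++ [PySem.List.pyGetD lst (s.2 : Int) 0], s.2 + 1)) ([], idx)

-- the while-True loop; fuel only makes the recursion total (Python loops forever when by ≤ 0,
-- which Pre_ excludes; inside Pre_ the fuel never runs out)
def groupALoop (lst : List Int) (by_ : Int) (grouped : List Int) (idx : Nat) : Nat → List Int
  | 0 => grouped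
  | fuel + 1 =>
    if by_ ≤ (lst.length : Int) - (idx : Int) then
      groupALoop lst by_ (grouped ++ (groupAStep lst by_ idx).1.reverse) (groupAStep lst by_ idx).2 fuel
    else
      -- temp = lst[idx:]; grouped.extend(reversed(temp)); break
      grouped ++ (PySem.List.slice lst (some (idx : Int)) none).reverse

def group_by_and_reverse (lst : List Int) (by_ : Int) : List Int :=
  groupALoop lst by_ [] 0 (lst.length + 1)

-- ===== PORT B =====
-- for i in range(0, len(lst), by): out.extend(lst[i:i+by][::-1])   ([::-1] is List.reverse,
-- cf. PySem.List.slice?_none_none_neg_one)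
def group_by_and_reverse_alt (lst : List Int) (by_ : Int) : List Int :=
  (PySem.List.pyRange 0 (lst.length : Int) by_).foldl
    (fun out i => out ++ (PySem.List.slice lst (some i) (some (i + by_))).reverse) []

-- ===== PRECONDITION & SPEC =====
-- Pre_ excludes by_ ≤ 0: there Python A never returns (the while-True loop runs forever,
-- since idx no longer advances), so nothing is claimed about those inputs.
def Pre_group_by_and_reverse (lst : List Int) (by_ : Int) : Prop := 1 ≤ by_
instance (lst : List Int) (by_ : Int) : Decidable (Pre_group_by_and_reverse lst by_) := by unfold Pre_group_by_and_reverse; infer_instance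
def pvWitness_group_by_and_reverse : List Int × Int := ([1, 2, 3, 4, 5], 2)

def Spec_group_by_and_reverse (lst : List Int) (by_ : Int) (out : List Int) : Prop := out = group_by_and_reverse_alt lst by_
instance (lst : List Int) (by_ : Int) (out : List Int) : Decidable (Spec_group_by_and_reverse lst by_ out) := by unfold Spec_group_by_and_reverse; infer_instance

-- ===== CLAIM (what is proved, stated in full; the proofs are below) =====
def Claim_equal_group_by_and_reverse : Prop := ∀ (lst : List Int) (by_ : Int), Dom_group_by_and_reverse lst by_ → Pre_group_by_and_reverse lst by_ → Spec_group_by_and_reverse lst by_ (group_by_and_reverse lst by_)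

-- ===== LEMMAS AND PROOFS =====

-- pyRange with a positive step, cons form
theorem pyRange_pos_cons {a c s : Int} (hs : 0 < s) (hac : a < c) :
    PySem.List.pyRange a c s = a :: PySem.List.pyRange (a + s) c s := by
  rw [PySem.List.pyRange_of_pos a c hs, PySem.List.pyRange_of_pos (a + s) c hs, if_pos hac]
  by_cases h : a + s < c
  · rw [if_pos h]
    have hnn : 0 ≤ (c - (a + s) + s - 1) / s := Int.ediv_nonneg (by omega) (by omega)
    have hdiv : (c - a + s - 1) / s = (c - (a + s) + s - 1) / s + 1 := by
      have e1 : c - a + s - 1 = (c - (a + s) + s - 1) + 1 * s := by ring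
      rw [e1, Int.add_mul_ediv_right _ _ (by omega : s ≠ 0)]
    have hK : ((c - a + s - 1) / s).toNat = ((c - (a + s) + s - 1) / s).toNat + 1 := by omega
    rw [hK, List.range_succ_eq_map, List.map_cons, List.map_map]
    have hf : ((fun k : Nat => a + s * (k : Int)) ∘ Nat.succ)
        = fun k : Nat => (a + s) + s * (k : Int) := by
      funext k
      simp only [Function.comp]
      push_cast
      ring
    rw [hf]
    norm_num
  · rw [if_neg h]
    rw [not_lt] at h
    have hq := Int.mul_ediv_add_emod (c - a + s - 1) s
    have hr1 := Int.emod_nonneg (c - a + s - 1) (by omega : s ≠ 0)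
    have hr2 := Int.emod_lt_of_pos (c - a + s - 1) hs
    have hq1 : 1 ≤ (c - a + s - 1) / s := by nlinarith
    have hq2 : (c - a + s - 1) / s < 2 := by nlinarith
    have hK : ((c - a + s - 1) / s).toNat = 1 := by omega
    rw [hK]
    simp

-- the inner append loop collects lst[idx], …, lst[idx+k-1] and advances idx by k
theorem groupAStep_fold (lst : List Int) (k : Nat) (temp : List Int) (idx : Nat) :
    (PySem.List.pyRange 0 (k : Int) 1).foldl
      (fun (s : List Int × Nat) _ => (s.1 ++ [PySem.List.pyGetD lst (s.2 : Int) 0], s.2 + 1)) (temp, idx)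
    = (temp ++ (List.range k).map (fun j => PySem.List.pyGetD lst ((idx + j : Nat) : Int) 0), idx + k) := by
  induction k with
  | zero => simp [PySem.List.pyRange_one_eq_nil]
  | succ k ih =>
    have hsplit : PySem.List.pyRange 0 ((k + 1 : Nat) : Int) 1
        = PySem.List.pyRange 0 (k : Int) 1 ++ [(k : Int)] := by
      push_cast
      exact PySem.List.pyRange_one_succ_right (by positivity)
    rw [hsplit, List.foldl_append, ih, List.foldl_cons, List.foldl_nil]
    dsimp only
    rw [List.range_succ, List.map_append, List.append_assoc]
    simp only [Prod.mk.injEq, List.map_cons, List.map_nil]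
    exact ⟨trivial, by omega⟩

-- the collected chunk is the slice lst[idx : idx+k] when it fits
theorem chunk_eq_slice (lst : List Int) (idx k : Nat) (h : idx + k ≤ lst.length) :
    (List.range k).map (fun j => PySem.List.pyGetD lst ((idx + j : Nat) : Int) 0)
    = PySem.List.slice lst (some (idx : Int)) (some ((idx : Int) + (k : Int))) := by
  rw [PySem.List.slice_toNat lst (by positivity) (by positivity)]
  have ht : ((idx : Int) + (k : Int)).toNat = idx + k := by omega
  have hi : ((idx : Int)).toNat = idx := by omega
  rw [ht, hi]
  have hk : idx + k - idx = k := by omega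
  rw [hk]
  apply List.ext_getElem
  · simp
    omega
  · intro j h1 h2
    have hj : j < k := by simpa using h1
    have hjl : idx + j < lst.length := by omega
    simp only [List.getElem_map, List.getElem_range, List.getElem_take, List.getElem_drop]
    rw [PySem.List.pyGetD_eq_getElem lst 0 (by positivity) (by exact_mod_cast hjl)]
    simp only [Int.toNat_natCast]

-- a slice whose stop reaches past the end equals the tail slice
theorem slice_stop_ge (lst : List Int) (idx : Nat) (c : Int)
    (h : (lst.length : Int) ≤ c) :
    PySem.List.slice lst (some (idx : Int)) (some c)
    = PySem.List.slice lst (some (idx : Int)) none := by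
  rw [PySem.List.slice_toNat lst (by positivity) (by omega),
      PySem.List.slice_from lst (by positivity)]
  apply List.take_of_length_le
  rw [List.length_drop]
  omega

-- main loop invariant: with enough fuel, the A-loop from idx appends exactly B's chunks from idx
theorem groupALoop_eq (lst : List Int) (by_ : Int) (hb : 1 ≤ by_) :
    ∀ (fuel idx : Nat) (g : List Int), idx ≤ lst.length → lst.length - idx < fuel →
    groupALoop lst by_ g idx fuel
    = g ++ (PySem.List.pyRange (idx : Int) (lst.length : Int) by_).flatMap
        (fun i => (PySem.List.slice lst (some i) (some (i + by_))).reverse) := by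
  intro fuel
  induction fuel with
  | zero => intro idx g _ h2; omega
  | succ fuel ih =>
    intro idx g h1 h2
    by_cases hc : by_ ≤ (lst.length : Int) - (idx : Int)
    · rw [groupALoop, if_pos hc]
      have hbk : by_ = (by_.toNat : Int) := by omega
      have hstep : groupAStep lst by_ idx
          = ((List.range by_.toNat).map (fun j => PySem.List.pyGetD lst ((idx + j : Nat) : Int) 0),
             idx + by_.toNat) := by
        unfold groupAStep
        rw [show PySem.List.pyRange 0 by_ 1 = PySem.List.pyRange 0 (by_.toNat : Int) 1 from by
              rw [← hbk]]
        rw [groupAStep_fold, List.nil_append]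
      have hfit : idx + by_.toNat ≤ lst.length := by omega
      rw [hstep]
      dsimp only
      rw [ih (idx + by_.toNat) _ (by omega) (by omega)]
      have hcons : PySem.List.pyRange (idx : Int) (lst.length : Int) by_
          = (idx : Int) :: PySem.List.pyRange ((idx : Int) + by_) (lst.length : Int) by_ :=
        pyRange_pos_cons (by omega) (by omega)
      rw [hcons, List.flatMap_cons, chunk_eq_slice lst idx by_.toNat hfit]
      have hcast : ((idx + by_.toNat : Nat) : Int) = (idx : Int) + by_ := by omega
      rw [hcast]
      have hck : (idx : Int) + (by_.toNat : Int) = (idx : Int) + by_ := by omega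
      rw [hck, List.append_assoc]
    · rw [groupALoop, if_neg hc]
      by_cases hidx : idx < lst.length
      · have hcons : PySem.List.pyRange (idx : Int) (lst.length : Int) by_
            = (idx : Int) :: PySem.List.pyRange ((idx : Int) + by_) (lst.length : Int) by_ :=
          pyRange_pos_cons (by omega) (by omega)
        have hnil : PySem.List.pyRange ((idx : Int) + by_) (lst.length : Int) by_ = [] := by
          rw [PySem.List.pyRange_of_pos _ _ (by omega : (0:Int) < by_), if_neg (by omega)]
          simp
        rw [hcons, hnil, List.flatMap_cons, List.flatMap_nil, List.append_nil,
            slice_stop_ge lst idx _ (by omega)]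
      · have hnil : PySem.List.pyRange (idx : Int) (lst.length : Int) by_ = [] := by
          rw [PySem.List.pyRange_of_pos _ _ (by omega : (0:Int) < by_), if_neg (by omega)]
          simp
        rw [hnil, List.flatMap_nil]
        have hend : idx = lst.length := by omega
        subst hend
        rw [PySem.List.slice_from lst (by positivity)]
        simp

-- ===== VERDICT (by name: the statement is the Claim_ definition above) =====
theorem group_by_and_reverse_spec : Claim_equal_group_by_and_reverse := by
  intro lst by_ _ hpre
  unfold Spec_group_by_and_reverse group_by_and_reverse group_by_and_reverse_alt
  rw [PySem.List.foldl_append_eq_flatMap]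
  rw [groupALoop_eq lst by_ hpre (lst.length + 1) 0 [] (by omega) (by omega)]
  simp
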